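-- pv_equiv track=rewrite | github.com/lisa-belle-suzuki/algorithm_study | LeetCode/Easy/401BinaryWatch.py | replace_zero_by_one_list
-- ===== SOURCE A (Python) =====
-- from collections import deque
--
-- def bit_str_to_int(bit_str):
--     power_of_two = 1
--     ret = 0
--     for c in bit_str[::-1]:
--         if c == '1': ret += power_of_two
--         power_of_two *= 2
--     return ret
--
-- def replace_zero_by_one_list(length: int, replace_nums: int):
--     q = deque()
--     q.append("")
--     ret = []
--     while q:
--         cur = q.popleft()
--         if cur.count('1') > replace_nums: continue
--         if len(cur)==length:
--             if cur.count('1')==replace_nums: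
--                 ret.append(cur)
--             continue
--         q.append(cur + '0')
--         q.append(cur + '1')
--     return [bit_str_to_int(bit_str) for bit_str in ret]
-- ===== SOURCE B (Python) =====
-- def replace_zero_by_one_list(length: int, replace_nums: int):
--     # Bottom-up DP on the number of bits: rows[k] holds the ascending list of
--     # n-bit values with exactly k ones; each new bit n contributes 2**(n-1)
--     # on top of every (k-1)-ones value of the previous width.
--     if length < 0 or replace_nums < 0 or replace_nums > length:
--         return []
--     K = replace_nums
--     rows = [[0]] + [[] for _ in range(K)]
--     for n in range(1, length + 1):
--         top = 1 << (n - 1)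
--         for k in range(min(K, n), 0, -1):
--             rows[k] = rows[k] + [top + x for x in rows[k - 1]]
--     return rows[K]
-- ===== Notes on version B (the rewrite author's own statement) =====
-- stated objective: alternative
-- what changed: Replaced the BFS over all bit-strings (deque of strings, per-node count('1') and string concatenation, then a string-to-int pass) by a bottom-up dynamic program over the bit width that keeps, per ones-count k, the ascending list of k-ones integer values and extends it with 2^(n-1)+x; intended as faster (it avoids enumerating all 2^length prefixes), though a timing run could not confirm a clean reading at the largest sizes; Pre_ excludes length<0 with replace_nums>=0, where A's while loop never terminates.
import Mathlib
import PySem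

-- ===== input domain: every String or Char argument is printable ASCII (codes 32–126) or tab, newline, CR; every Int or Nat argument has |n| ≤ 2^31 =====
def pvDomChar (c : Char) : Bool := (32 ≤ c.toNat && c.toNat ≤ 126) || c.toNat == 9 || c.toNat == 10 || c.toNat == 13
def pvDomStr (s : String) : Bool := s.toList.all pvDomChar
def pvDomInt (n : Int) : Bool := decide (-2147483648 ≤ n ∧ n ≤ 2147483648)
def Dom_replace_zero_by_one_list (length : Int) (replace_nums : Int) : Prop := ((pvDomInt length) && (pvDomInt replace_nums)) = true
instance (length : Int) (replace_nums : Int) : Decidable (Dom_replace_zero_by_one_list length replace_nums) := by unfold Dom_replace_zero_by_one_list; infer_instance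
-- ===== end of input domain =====

-- B replaces A's breadth-first enumeration of bit-strings by a recursion on the most
-- significant bit producing the ascending integer list directly; Pre_ excludes
-- length < 0 with replace_nums ≥ 0, where A's while loop never terminates.


-- ===== PORT A =====
-- helper bit_str_to_int: fold over the reversed string with state (ret, power_of_two)
def bit_str_to_int_port (s : List Char) : Int :=
  (s.reverse.foldl
    (fun (acc : Int × Int) c => (if c = '1' then acc.1 + acc.2 else acc.1, acc.2 * 2))
    (0, 1)).1

-- the while loop over the deque, fueled (one fuel unit per iteration; the fuel chosen
-- in replace_zero_by_one_list is proved sufficient whenever the Python loop terminates)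
def pvALoop (length rn : Int) : Nat → List (List Char) → List (List Char) → List (List Char)
  | 0, _, ret => ret
  | _ + 1, [], ret => ret
  | f + 1, cur :: q, ret =>
    if ((cur.count '1' : Int) > rn) then pvALoop length rn f q ret
    else if ((cur.length : Int) = length) then
      if ((cur.count '1' : Int) = rn) then pvALoop length rn f q (ret ++ [cur])
      else pvALoop length rn f q ret
    else pvALoop length rn f (q ++ [cur ++ ['0'], cur ++ ['1']]) ret

def replace_zero_by_one_list (length : Int) (replace_nums : Int) : List Int :=
  (pvALoop length replace_nums (2 ^ (length.toNat + 2)) [[]] []).map bit_str_to_int_port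

-- ===== PORT B =====
-- inner loop: for k in range(m, 0, -1): rows[k] = rows[k] + [top + x for x in rows[k-1]]
def pvInner (top : Int) : Nat → List (List Int) → List (List Int)
  | 0, rows => rows
  | k + 1, rows =>
    pvInner top k (rows.set (k + 1) (rows.getD (k + 1) [] ++ (rows.getD k []).map (fun x => top + x)))

def replace_zero_by_one_list_alt (length : Int) (replace_nums : Int) : List Int :=
  if length < 0 ∨ replace_nums < 0 ∨ length < replace_nums then []
  else
    let K := replace_nums.toNat
    let rows := (List.range length.toNat).foldl
      (fun rows i => pvInner (2 ^ i) (min K (i + 1)) rows)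
      ([0] :: List.replicate K [])
    rows.getD K []

-- ===== PRECONDITION & SPEC =====
-- Pre_ excludes length < 0 together with replace_nums ≥ 0: there A's while loop
-- runs forever (len(cur) never equals a negative length), so A returns on exactly Pre_.
def Pre_replace_zero_by_one_list (length : Int) (replace_nums : Int) : Prop :=
  0 ≤ length ∨ replace_nums < 0
instance (length : Int) (replace_nums : Int) : Decidable (Pre_replace_zero_by_one_list length replace_nums) := by
  unfold Pre_replace_zero_by_one_list; infer_instance

def pvWitness_replace_zero_by_one_list : Int × Int := (3, 1)

def Spec_replace_zero_by_one_list (length : Int) (replace_nums : Int) (out : List Int) : Prop := out = replace_zero_by_one_list_alt length replace_nums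
instance (length : Int) (replace_nums : Int) (out : List Int) : Decidable (Spec_replace_zero_by_one_list length replace_nums out) := by unfold Spec_replace_zero_by_one_list; infer_instance

-- ===== CLAIM (what is proved, stated in full; the proofs are below) =====
def Claim_equal_replace_zero_by_one_list : Prop := ∀ (length : Int) (replace_nums : Int), Dom_replace_zero_by_one_list length replace_nums → Pre_replace_zero_by_one_list length replace_nums → Spec_replace_zero_by_one_list length replace_nums (replace_zero_by_one_list length replace_nums)

-- ===== LEMMAS AND PROOFS =====

-- proof-side description of one loop iteration: enqueued children / emitted output of cur
def pvNext1 (length rn : Int) (s : List Char) : List (List Char) :=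
  if (s.count '1' : Int) > rn then []
  else if (s.length : Int) = length then []
  else [s ++ ['0'], s ++ ['1']]

def pvOut1 (length rn : Int) (s : List Char) : List (List Char) :=
  if (s.count '1' : Int) > rn then []
  else if (s.length : Int) = length then (if (s.count '1' : Int) = rn then [s] else [])
  else []

-- the BFS levels of A's queue
def pvLevels (length rn : Int) : Nat → List (List Char)
  | 0 => [[]]
  | i + 1 => (pvLevels length rn i).flatMap (pvNext1 length rn)

-- the length-agnostic pruned tree (pruning by count ≤ k only)
def pvStep1 (k : Int) (s : List Char) : List (List Char) :=
  if (s.count '1' : Int) ≤ k then [s ++ ['0'], s ++ ['1']] else []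

def pvP (k : Int) : Nat → List (List Char)
  | 0 => [[]]
  | i + 1 => (pvP k i).flatMap (pvStep1 k)

-- fuel consumed from level i on, for c levels
def pvNeedFrom (length rn : Int) : Nat → Nat → Nat
  | _, 0 => 0
  | i, c + 1 => (pvLevels length rn i).length + pvNeedFrom length rn (i + 1) c

-- outputs emitted from level i on, for c levels
def pvOutsFrom (length rn : Int) : Nat → Nat → List (List Char)
  | _, 0 => []
  | i, c + 1 => (pvLevels length rn i).flatMap (pvOut1 length rn) ++ pvOutsFrom length rn (i + 1) c

theorem pvALoop_step (length rn : Int) (f : Nat) (cur : List Char) (q ret : List (List Char)) :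
    pvALoop length rn (f + 1) (cur :: q) ret
      = pvALoop length rn f (q ++ pvNext1 length rn cur) (ret ++ pvOut1 length rn cur) := by
  simp only [pvALoop, pvNext1, pvOut1]
  split_ifs with h1 h2 h3 <;> simp

theorem pvALoop_batch (length rn : Int) (A : List (List Char)) :
    ∀ (q ret : List (List Char)) (f : Nat),
      pvALoop length rn (A.length + f) (A ++ q) ret
        = pvALoop length rn f (q ++ A.flatMap (pvNext1 length rn)) (ret ++ A.flatMap (pvOut1 length rn)) := by
  induction A with
  | nil => intro q ret f; simp
  | cons a A ih =>
    intro q ret f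
    have h1 : (a :: A).length + f = (A.length + f) + 1 := by simp; omega
    rw [h1, List.cons_append, pvALoop_step, List.append_assoc, ih]
    simp [List.flatMap_cons, List.append_assoc]

-- generic list helpers
theorem pv_flatMap_congr {α β : Type} (l : List α) (f g : α → List β)
    (h : ∀ x ∈ l, f x = g x) : l.flatMap f = l.flatMap g := by
  induction l with
  | nil => rfl
  | cons a l ih =>
    simp only [List.flatMap_cons]
    rw [h a (by simp), ih (fun x hx => h x (by simp [hx]))]

theorem pv_flatMap_if_filter {α : Type} (l : List α) (p : α → Bool) :
    (l.flatMap fun s => if p s then [s] else []) = l.filter p := by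
  induction l with
  | nil => rfl
  | cons a l ih => by_cases h : p a <;> simp [List.flatMap_cons, h, ih]

-- elements of level i have list length i
theorem pvLevels_length_mem (length rn : Int) :
    ∀ (i : Nat) (s : List Char), s ∈ pvLevels length rn i → s.length = i := by
  intro i
  induction i with
  | zero => intro s hs; simp [pvLevels] at hs; simp [hs]
  | succ i ih =>
    intro s hs
    simp only [pvLevels, List.mem_flatMap] at hs
    obtain ⟨t, ht, hs⟩ := hs
    simp only [pvNext1] at hs
    split_ifs at hs <;> simp at hs
    rcases hs with h | h <;> subst h <;> simp [ih t ht]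

theorem pvP_length_mem (k : Int) :
    ∀ (i : Nat) (s : List Char), s ∈ pvP k i → s.length = i := by
  intro i
  induction i with
  | zero => intro s hs; simp [pvP] at hs; simp [hs]
  | succ i ih =>
    intro s hs
    simp only [pvP, List.mem_flatMap] at hs
    obtain ⟨t, ht, hs⟩ := hs
    simp only [pvStep1] at hs
    split_ifs at hs <;> simp at hs
    rcases hs with h | h <;> subst h <;> simp [ih t ht]

-- below the target depth, A's levels coincide with the pure pruned tree
theorem pvLevels_eq_pvP (length rn : Int) :
    ∀ (i : Nat), (i : Int) ≤ length → pvLevels length rn i = pvP rn i := by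
  intro i
  induction i with
  | zero => intro _; rfl
  | succ i ih =>
    intro hi
    have hi' : (i : Int) ≤ length := by push_cast at hi ⊢; omega
    simp only [pvLevels, pvP, ih hi']
    apply pv_flatMap_congr
    intro s hs
    have hlen : s.length = i := pvP_length_mem rn i s hs
    have hne : ((s.length : Int) = length) = False := by
      simp [hlen]; push_cast at hi; omega
    simp [pvNext1, pvStep1, hne]
    split_ifs with h1 h2 <;> try rfl
    · omega
    · omega

theorem pvLevels_top_empty (length rn : Int) (h : 0 ≤ length) :
    pvLevels length rn (length.toNat + 1) = [] := by
  simp only [pvLevels]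
  rw [List.flatMap_eq_nil_iff]
  intro s hs
  have hlen : s.length = length.toNat := pvLevels_length_mem length rn _ s hs
  have : ((s.length : Int) = length) := by rw [hlen]; omega
  simp [pvNext1, this]


-- ===== bit_str_to_int characterisation =====
theorem pv_fold_snd (l : List Char) : ∀ (r p : Int),
    (l.foldl (fun (acc : Int × Int) c => (if c = '1' then acc.1 + acc.2 else acc.1, acc.2 * 2)) (r, p)).2
      = p * 2 ^ l.length := by
  induction l with
  | nil => intro r p; simp
  | cons c l ih =>
    intro r p
    simp only [List.foldl_cons, ih, List.length_cons]
    ring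

theorem pv_fold_fst (l : List Char) : ∀ (r p : Int),
    (l.foldl (fun (acc : Int × Int) c => (if c = '1' then acc.1 + acc.2 else acc.1, acc.2 * 2)) (r, p)).1
      = r + (l.foldl (fun (acc : Int × Int) c => (if c = '1' then acc.1 + acc.2 else acc.1, acc.2 * 2)) (0, p)).1 := by
  induction l with
  | nil => intro r p; simp
  | cons c l ih =>
    intro r p
    simp only [List.foldl_cons]
    rw [ih, ih (if c = '1' then 0 + p else 0)]
    by_cases h : c = '1' <;> simp [h]
    ring

theorem pv_bit_cons (c : Char) (t : List Char) :
    bit_str_to_int_port (c :: t)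
      = (if c = '1' then (2 : Int) ^ t.length else 0) + bit_str_to_int_port t := by
  unfold bit_str_to_int_port
  rw [List.reverse_cons, List.foldl_append]
  simp only [List.foldl_cons, List.foldl_nil]
  rw [pv_fold_fst]
  have hs : (t.reverse.foldl
      (fun (acc : Int × Int) c => (if c = '1' then acc.1 + acc.2 else acc.1, acc.2 * 2)) (0, 1)).2
      = 2 ^ t.length := by
    rw [pv_fold_snd, List.length_reverse, one_mul]
  by_cases h : c = '1'
  · rw [if_pos h, if_pos h, hs]; ring
  · rw [if_neg h, if_neg h]; ring

theorem pv_bit_cons0 (t : List Char) : bit_str_to_int_port ('0' :: t) = bit_str_to_int_port t := by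
  rw [pv_bit_cons, if_neg (by decide), zero_add]

theorem pv_bit_cons1 (t : List Char) :
    bit_str_to_int_port ('1' :: t) = (2 : Int) ^ t.length + bit_str_to_int_port t := by
  rw [pv_bit_cons, if_pos rfl]

-- ===== the pruned tree splits on the most significant bit =====
theorem pv_count_cons0 (t : List Char) : ('0' :: t).count '1' = t.count '1' := by
  simp

theorem pv_count_cons1 (t : List Char) : ('1' :: t).count '1' = t.count '1' + 1 := by
  simp

theorem pv_fm0 (k : Int) (l : List (List Char)) :
    ((l.map (List.cons '0')).filter fun s => decide (((s.count '1' : Nat) : Int) = k))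
      = (l.filter fun s => decide (((s.count '1' : Nat) : Int) = k)).map (List.cons '0') := by
  induction l with
  | nil => rfl
  | cons a l ih =>
    by_cases h : ((a.count '1' : Nat) : Int) = k <;>
      simp [h, ih]

theorem pv_fm1 (k : Int) (l : List (List Char)) :
    ((l.map (List.cons '1')).filter fun s => decide (((s.count '1' : Nat) : Int) = k))
      = (l.filter fun s => decide (((s.count '1' : Nat) : Int) = k - 1)).map (List.cons '1') := by
  induction l with
  | nil => rfl
  | cons a l ih =>
    have hc : ((((('1' :: a).count '1' : Nat)) : Int) = k) = (((a.count '1' : Nat) : Int) = k - 1) := by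
      rw [pv_count_cons1, eq_iff_iff]; push_cast; omega
    simp only [List.map_cons, List.filter_cons, hc]
    by_cases h : ((a.count '1' : Nat) : Int) = k - 1 <;> simp [h, ih]

theorem pvStep1_cons0 (k : Int) (t : List Char) :
    pvStep1 k ('0' :: t) = (pvStep1 k t).map (List.cons '0') := by
  simp only [pvStep1, pv_count_cons0]
  split_ifs <;> simp

theorem pvStep1_cons1 (k : Int) (t : List Char) :
    pvStep1 k ('1' :: t) = (pvStep1 (k - 1) t).map (List.cons '1') := by
  simp only [pvStep1, pv_count_cons1]
  have h : (((t.count '1' + 1 : Nat) : Int) ≤ k) ↔ (((t.count '1' : Nat) : Int) ≤ k - 1) := by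
    push_cast; omega
  rw [if_congr h rfl rfl]
  split_ifs <;> simp

theorem pvP_split (k : Int) (hk : 0 ≤ k) :
    ∀ i : Nat, pvP k (i + 1) = (pvP k i).map (List.cons '0') ++ (pvP (k - 1) i).map (List.cons '1') := by
  intro i
  induction i with
  | zero =>
    show (pvP k 0).flatMap (pvStep1 k) = _
    simp [pvP, pvStep1, hk]
  | succ i ih =>
    show (pvP k (i + 1)).flatMap (pvStep1 k) = _
    conv_lhs => rw [ih]
    rw [List.flatMap_append, List.flatMap_map, List.flatMap_map]
    simp only [pvStep1_cons0, pvStep1_cons1]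
    rw [← List.map_flatMap, ← List.map_flatMap]
    rfl

-- filters on counts that cannot be met are empty
theorem pv_filter_neg {l : List (List Char)} {k : Int} (hk : k < 0) :
    (l.filter fun s => decide (((s.count '1' : Nat) : Int) = k)) = [] := by
  rw [List.filter_eq_nil_iff]
  intro s _
  simp only [decide_eq_true_eq]
  omega

theorem pv_filter_high (k' k : Int) (i : Nat) (hk : (i : Int) < k) :
    ((pvP k' i).filter fun s => decide (((s.count '1' : Nat) : Int) = k)) = [] := by
  rw [List.filter_eq_nil_iff]
  intro s hs
  have h1 : s.length = i := pvP_length_mem k' i s hs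
  have h2 : s.count '1' ≤ s.length := List.count_le_length
  simp only [decide_eq_true_eq]
  omega

-- ===== the filtered level lists and their Pascal-style recurrence =====
def pvFI (n : Nat) (k : Int) : List Int :=
  ((pvP k n).filter fun s => decide (((s.count '1' : Nat) : Int) = k)).map bit_str_to_int_port

theorem pvFI_neg {n : Nat} {k : Int} (hk : k < 0) : pvFI n k = [] := by
  unfold pvFI; rw [pv_filter_neg hk]; rfl

theorem pvFI_high {n : Nat} {k : Int} (hk : (n : Int) < k) : pvFI n k = [] := by
  unfold pvFI; rw [pv_filter_high k k n hk]; rfl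

theorem pvF_succ (n : Nat) (k : Int) (hk : 0 ≤ k) :
    pvFI (n + 1) k = pvFI n k ++ (pvFI n (k - 1)).map (fun x => (2 : Int) ^ n + x) := by
  unfold pvFI
  rw [pvP_split k hk n, List.filter_append, List.map_append]
  rw [pv_fm0 k (pvP k n), pv_fm1 k (pvP (k - 1) n)]
  congr 1
  · rw [List.map_map]
    exact (List.map_congr_left (fun t _ => by
      simp only [Function.comp_apply, pv_bit_cons0])).symm
  · rw [List.map_map, List.map_map]
    refine (List.map_congr_left (fun t ht => ?_)).symm
    have hmem : t ∈ pvP (k - 1) n := List.mem_of_mem_filter ht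
    have hlen : t.length = n := pvP_length_mem (k - 1) n t hmem
    simp only [Function.comp_apply, pv_bit_cons1, hlen]

theorem pvFI_zero : ∀ n : Nat, pvFI n 0 = [0] := by
  intro n
  induction n with
  | zero => norm_num [pvFI, pvP, bit_str_to_int_port]
  | succ n ih => rw [pvF_succ n 0 le_rfl, pvFI_neg (by omega : (0 : Int) - 1 < 0), ih]; rfl

-- the DP's inner loop establishes row (n+1) above the already-processed indices
theorem pvInner_length (top : Int) : ∀ (k : Nat) (rows : List (List Int)),
    (pvInner top k rows).length = rows.length := by
  intro k
  induction k with
  | zero => intro rows; rfl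
  | succ k ih => intro rows; rw [pvInner, ih, List.length_set]

theorem pvInner_inv (n K : Nat) : ∀ (k : Nat) (rows : List (List Int)), k ≤ K →
    rows.length = K + 1 →
    (∀ j : Nat, j ≤ K → rows.getD j [] = if j ≤ k then pvFI n (j : Int) else pvFI (n + 1) (j : Int)) →
    ∀ j : Nat, j ≤ K →
      (pvInner ((2 : Int) ^ n) k rows).getD j [] = pvFI (n + 1) (j : Int) := by
  intro k
  induction k with
  | zero =>
    intro rows _ _ hrows j hj
    have := hrows j hj
    by_cases h0 : j = 0
    · subst h0
      simp only [pvInner]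
      rw [this, if_pos (le_refl 0)]
      simp [pvFI_zero]
    · simp only [pvInner]
      rw [this, if_neg (by omega)]
  | succ k ih =>
    intro rows hk hlen hrows j hj
    simp only [pvInner]
    apply ih _ (by omega) (by rw [List.length_set, hlen]) _ j hj
    intro j' hj'
    rw [List.getD_eq_getElem?_getD, List.getElem?_set]
    by_cases he : k + 1 = j'
    · subst he
      rw [if_pos rfl, if_pos (by omega), Option.getD_some]
      rw [if_neg (by omega)]
      rw [hrows (k + 1) hj', if_pos le_rfl, hrows k (by omega), if_pos (by omega)]
      have h1 : ((k + 1 : Nat) : Int) - 1 = (k : Int) := by push_cast; ring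
      rw [pvF_succ n ((k + 1 : Nat) : Int) (by positivity), h1]
    · rw [if_neg he, ← List.getD_eq_getElem?_getD, hrows j' hj']
      by_cases hle : j' ≤ k
      · rw [if_pos hle, if_pos (by omega)]
      · rw [if_neg hle, if_neg (by omega)]

-- the DP's outer loop: after n widths, row j is exactly the filtered level list
theorem pvOuter_inv (K : Nat) : ∀ (L : Nat),
    ((List.range L).foldl (fun rows i => pvInner ((2 : Int) ^ i) (min K (i + 1)) rows)
        ([0] :: List.replicate K [])).length = K + 1 ∧
    (∀ j : Nat, j ≤ K →
      ((List.range L).foldl (fun rows i => pvInner ((2 : Int) ^ i) (min K (i + 1)) rows)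
        ([0] :: List.replicate K [])).getD j [] = pvFI L (j : Int)) := by
  intro L
  induction L with
  | zero =>
    refine ⟨by simp, ?_⟩
    intro j hj
    by_cases h0 : j = 0
    · subst h0; simp [pvFI_zero]
    · have h1 : (0 : Int) < (j : Int) := by omega
      rw [pvFI_high h1]
      rcases j with _ | j
      · omega
      · simp only [List.range_zero, List.foldl_nil]
        rw [List.getD_eq_getElem?_getD]
        simp only [List.getElem?_cons_succ, List.getElem?_replicate]
        split_ifs <;> rfl
  | succ L ih =>
    obtain ⟨ihlen, ihrow⟩ := ih
    rw [List.range_succ, List.foldl_append, List.foldl_cons, List.foldl_nil]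
    constructor
    · rw [pvInner_length, ihlen]
    · intro j hj
      apply pvInner_inv L K (min K (L + 1)) _ (by omega) ihlen _ j hj
      intro j' hj'
      rw [ihrow j' hj']
      by_cases hle : j' ≤ min K (L + 1)
      · rw [if_pos hle]
      · rw [if_neg hle]
        have hbig : (L : Int) < (j' : Int) := by omega
        have hbig1 : ((L + 1 : Nat) : Int) < (j' : Int) := by push_cast; omega
        rw [pvFI_high hbig, pvFI_high hbig1]

-- ===== running the loop over the levels =====
theorem pvALoop_nil (length rn : Int) (f : Nat) (ret : List (List Char)) :
    pvALoop length rn f [] ret = ret := by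
  cases f <;> rfl

theorem pvALoop_run (length rn : Int) :
    ∀ (c i : Nat), i + c = length.toNat + 1 → 0 ≤ length →
      ∀ (f : Nat) (ret : List (List Char)),
        pvALoop length rn (pvNeedFrom length rn i c + f) (pvLevels length rn i) ret
          = ret ++ pvOutsFrom length rn i c := by
  intro c
  induction c with
  | zero =>
    intro i hi hl f ret
    have : i = length.toNat + 1 := by omega
    subst this
    rw [pvLevels_top_empty length rn hl]
    simp [pvNeedFrom, pvOutsFrom, pvALoop_nil]
  | succ c ih =>
    intro i hi hl f ret
    have h1 : pvNeedFrom length rn i (c + 1) + f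
        = (pvLevels length rn i).length + (pvNeedFrom length rn (i + 1) c + f) := by
      simp [pvNeedFrom]; omega
    have hb := pvALoop_batch length rn (pvLevels length rn i) [] ret (pvNeedFrom length rn (i + 1) c + f)
    simp only [List.append_nil, List.nil_append] at hb
    rw [h1, hb]
    rw [show (pvLevels length rn i).flatMap (pvNext1 length rn) = pvLevels length rn (i + 1) from rfl]
    rw [ih (i + 1) (by omega) hl]
    simp [pvOutsFrom, List.append_assoc]

theorem pvOutsFrom_eq (length rn : Int) :
    ∀ (c i : Nat), i + (c + 1) = length.toNat + 1 →
      pvOutsFrom length rn i (c + 1)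
        = (pvLevels length rn length.toNat).flatMap (pvOut1 length rn) := by
  intro c
  induction c with
  | zero =>
    intro i hi
    have : i = length.toNat := by omega
    subst this
    simp [pvOutsFrom]
  | succ c ih =>
    intro i hi
    have hlow : (pvLevels length rn i).flatMap (pvOut1 length rn) = [] := by
      rw [List.flatMap_eq_nil_iff]
      intro s hs
      have hlen : s.length = i := pvLevels_length_mem length rn i s hs
      have hne : ¬ ((s.length : Int) = length) := by rw [hlen]; omega
      simp [pvOut1, hne]
    show (pvLevels length rn i).flatMap (pvOut1 length rn) ++ pvOutsFrom length rn (i + 1) (c + 1) = _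
    rw [hlow, List.nil_append, ih (i + 1) (by omega)]

-- ===== fuel bounds =====
theorem pv_flatMap_len {α β : Type} (l : List α) (g : α → List β) (h : ∀ x, (g x).length ≤ 2) :
    (l.flatMap g).length ≤ 2 * l.length := by
  induction l with
  | nil => simp
  | cons a l ih =>
    simp only [List.flatMap_cons, List.length_append, List.length_cons]
    have := h a
    omega

theorem pvLevels_len_le (length rn : Int) : ∀ i : Nat, (pvLevels length rn i).length ≤ 2 ^ i := by
  intro i
  induction i with
  | zero => simp [pvLevels]
  | succ i ih =>
    have h1 : ((pvLevels length rn i).flatMap (pvNext1 length rn)).length ≤ 2 * (pvLevels length rn i).length := by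
      apply pv_flatMap_len
      intro s
      simp only [pvNext1]
      split_ifs <;> simp
    show ((pvLevels length rn i).flatMap (pvNext1 length rn)).length ≤ 2 ^ (i + 1)
    calc _ ≤ 2 * (pvLevels length rn i).length := h1
    _ ≤ 2 * 2 ^ i := by omega
    _ = 2 ^ (i + 1) := by ring

theorem pvNeedFrom_le (length rn : Int) : ∀ (c i : Nat), pvNeedFrom length rn i c ≤ 2 ^ (i + c) - 2 ^ i := by
  intro c
  induction c with
  | zero => intro i; simp [pvNeedFrom]
  | succ c ih =>
    intro i
    have h1 := pvLevels_len_le length rn i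
    have h2 := ih (i + 1)
    have e1 : (2 : Nat) ^ (i + 1) = 2 * 2 ^ i := by ring
    have e2 : (2 : Nat) ^ (i + (c + 1)) = 2 ^ (i + 1 + c) := by ring_nf
    have e3 : (2 : Nat) ^ (i + 1) ≤ 2 ^ (i + 1 + c) := Nat.pow_le_pow_right (by norm_num) (by omega)
    simp only [pvNeedFrom]
    omega

-- ===== VERDICT (by name: the statement is the Claim_ definition above) =====
theorem pvOut_top (length rn : Int) (hl : 0 ≤ length) :
    (pvLevels length rn length.toNat).flatMap (pvOut1 length rn)
      = (pvLevels length rn length.toNat).filter fun s => decide (((s.count '1' : Nat) : Int) = rn) := by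
  rw [← pv_flatMap_if_filter]
  apply pv_flatMap_congr
  intro s hs
  have hlen : s.length = length.toNat := pvLevels_length_mem length rn _ s hs
  have heq : ((s.length : Int) = length) := by rw [hlen]; omega
  by_cases h : ((s.count '1' : Nat) : Int) = rn
  · have h2 : ¬ ((s.count '1' : Nat) : Int) > rn := by omega
    simp [pvOut1, heq, h]
  · by_cases h2 : ((s.count '1' : Nat) : Int) > rn <;> simp [pvOut1, heq, h, h2]

theorem replace_zero_by_one_list_spec : Claim_equal_replace_zero_by_one_list := by
  unfold Claim_equal_replace_zero_by_one_list
  intro length rn _ hpre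
  unfold Spec_replace_zero_by_one_list replace_zero_by_one_list replace_zero_by_one_list_alt
  unfold Pre_replace_zero_by_one_list at hpre
  by_cases hl : 0 ≤ length
  · have hfuel : pvNeedFrom length rn 0 (length.toNat + 1) ≤ 2 ^ (length.toNat + 2) := by
      have h1 := pvNeedFrom_le length rn (length.toNat + 1) 0
      have h2 : (2 : Nat) ^ (0 + (length.toNat + 1)) ≤ 2 ^ (length.toNat + 2) :=
        Nat.pow_le_pow_right (by norm_num) (by omega)
      exact le_trans (le_trans h1 (Nat.sub_le _ _)) h2
    have hsum : pvNeedFrom length rn 0 (length.toNat + 1)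
        + (2 ^ (length.toNat + 2) - pvNeedFrom length rn 0 (length.toNat + 1))
        = 2 ^ (length.toNat + 2) := Nat.add_sub_cancel' hfuel
    rw [← hsum]
    rw [show ([[]] : List (List Char)) = pvLevels length rn 0 from rfl]
    rw [pvALoop_run length rn (length.toNat + 1) 0 (by omega) hl]
    rw [List.nil_append]
    rw [pvOutsFrom_eq length rn length.toNat 0 (by omega)]
    rw [pvOut_top length rn hl]
    rw [pvLevels_eq_pvP length rn length.toNat (by omega)]
    rw [show ((pvP rn length.toNat).filter fun s =>
        decide (((s.count '1' : Nat) : Int) = rn)).map bit_str_to_int_port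
      = pvFI length.toNat rn from rfl]
    by_cases hr : rn < 0
    · rw [if_pos (Or.inr (Or.inl hr)), pvFI_neg hr]
    · by_cases hgt : length < rn
      · rw [if_pos (Or.inr (Or.inr hgt)),
          pvFI_high (by rw [Int.toNat_of_nonneg hl]; exact hgt)]
      · rw [if_neg (by omega)]
        have hout := (pvOuter_inv rn.toNat length.toNat).2 rn.toNat le_rfl
        rw [Int.toNat_of_nonneg (by omega : 0 ≤ rn)] at hout
        exact hout.symm
  · have hrn : rn < 0 := hpre.resolve_left (by omega)
    have ht : length.toNat = 0 := by omega
    rw [ht]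
    rw [show (2 : Nat) ^ (0 + 2) = 3 + 1 from rfl]
    rw [pvALoop_step]
    rw [show pvNext1 length rn [] = [] from by simp [pvNext1]; omega,
        show pvOut1 length rn [] = [] from by simp [pvOut1]; omega]
    simp only [List.append_nil]
    rw [pvALoop_nil]
    rw [if_pos (Or.inl (by omega : length < 0))]
    rfl
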